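-- pv_equiv track=rewrite | github.com/Matematik411/programiranje-1 | 13-memoizacija/vaje/Euler_vaja.py | cesta
-- ===== SOURCE A (Python) =====
-- polozaji = [6, 9, 12, 14]
--
-- prihodki = [5, 6, 3, 7]
--
-- t = 2
--
-- def cesta(i):
--     if i <= 0:
--         return 0
--     if i in polozaji:
--         spustimo = cesta(i-1)
--         uporabimo = prihodki[polozaji.index(i)] + cesta(i-t-1)
--         return max(spustimo, uporabimo)
--     else:
--         return cesta(i-1)
-- ===== SOURCE B (Python) =====
-- polozaji = [6, 9, 12, 14]
--
-- prihodki = [5, 6, 3, 7]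
--
-- t = 2
--
-- def cesta(i):
--     if i <= 0:
--         return 0
--     dp = [0] * (i + 1)
--     for k in range(1, i + 1):
--         if k in polozaji:
--             dp[k] = max(dp[k - 1], prihodki[polozaji.index(k)] + dp[max(k - t - 1, 0)])
--         else:
--             dp[k] = dp[k - 1]
--     return dp[i]
-- ===== Notes on version B (the rewrite author's own statement) =====
-- stated objective: alternative
-- what changed: Replaced the unmemoized top-down recursion with a bottom-up DP table of length i+1 filled left-to-right, returning dp[i]; B also avoids deep recursion, so it returns for large i where A raises RecursionError.
-- outside the precondition, e.g. on cesta(9500): A returns 18, B returns 18; on cesta(20000): A raises RecursionError, B returns 18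
import Mathlib
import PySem

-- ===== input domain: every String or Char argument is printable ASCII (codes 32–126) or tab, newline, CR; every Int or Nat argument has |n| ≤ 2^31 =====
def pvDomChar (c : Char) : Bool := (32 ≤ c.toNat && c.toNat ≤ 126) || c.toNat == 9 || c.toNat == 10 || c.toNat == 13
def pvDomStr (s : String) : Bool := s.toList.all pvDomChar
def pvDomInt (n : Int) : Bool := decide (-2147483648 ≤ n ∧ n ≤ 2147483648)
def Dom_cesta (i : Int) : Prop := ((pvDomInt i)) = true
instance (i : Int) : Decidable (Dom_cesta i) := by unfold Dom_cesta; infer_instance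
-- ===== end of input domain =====

-- B replaces A's unmemoized top-down recursion by a bottom-up DP table; same values, no deep recursion.

-- ===== PORT A =====
def polozaji : List Int := [6, 9, 12, 14]
def prihodki : List Int := [5, 6, 3, 7]
def t : Int := 2

-- prihodki[polozaji.index(i)]; the `none` branches are unreachable: A only evaluates
-- this under the guard `i in polozaji`, and prihodki has the same length as polozaji.
def prihOf (i : Int) : Int :=
  match PySem.List.index? polozaji i with
  | some j => (PySem.List.pyGet? prihodki (Int.ofNat j)).getD 0
  | none => 0

def cesta (i : Int) : Int :=
  if i ≤ 0 then 0
  else if i ∈ polozaji then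
    max (cesta (i - 1)) (prihOf i + cesta (i - t - 1))
  else cesta (i - 1)
termination_by i.toNat
decreasing_by all_goals ((try simp only [t]); omega)

-- ===== PORT B =====
-- one DP step: dp has entries for 0..k-1, appends entry for cell k
def dpStep (dp : List Int) (k : Int) : List Int :=
  if k ∈ polozaji then
    dp ++ [max (dp.getD (k - 1).toNat 0) (prihOf k + dp.getD (max (k - t - 1) 0).toNat 0)]
  else
    dp ++ [dp.getD (k - 1).toNat 0]

def cesta_alt (i : Int) : Int :=
  if i ≤ 0 then 0
  else
    let dp := (List.range i.toNat).foldl (fun (dp : List Int) (k0 : Nat) => dpStep dp ((k0 : Int) + 1)) [0]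
    dp.getD i.toNat 0

-- ===== PRECONDITION & SPEC =====
-- Pre_ excludes large i, on which A's linear-depth recursion exceeds the
-- interpreter's recursion limit and raises RecursionError; the bound leaves a
-- margin below the environment-dependent exact threshold.
def Pre_cesta (i : Int) : Prop := i ≤ 9000
instance (i : Int) : Decidable (Pre_cesta i) := by unfold Pre_cesta; infer_instance
def pvWitness_cesta : Int := (15)

def Spec_cesta (i : Int) (out : Int) : Prop := out = cesta_alt i
instance (i : Int) (out : Int) : Decidable (Spec_cesta i out) := by unfold Spec_cesta; infer_instance

-- ===== CLAIM (what is proved, stated in full; the proofs are below) =====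
def Claim_equal_cesta : Prop := ∀ (i : Int), Dom_cesta i → Pre_cesta i → Spec_cesta i (cesta i)

-- ===== LEMMAS AND PROOFS =====

theorem cesta_nonpos (i : Int) (h : i ≤ 0) : cesta i = 0 := by
  rw [cesta]; simp [h]

theorem cesta_pos (i : Int) (h : ¬ i ≤ 0) :
    cesta i = if i ∈ polozaji then max (cesta (i - 1)) (prihOf i + cesta (i - t - 1))
              else cesta (i - 1) := by
  rw [cesta]; simp [h]

-- the fold invariant: after m steps the table lists cesta 0, …, cesta m
theorem dp_invariant (m : Nat) :
    (List.range m).foldl (fun (dp : List Int) (k0 : Nat) => dpStep dp ((k0 : Int) + 1)) [0]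
      = (List.range (m + 1)).map (fun (j : Nat) => cesta (j : Int)) := by
  induction m with
  | zero => simp [List.range_succ, cesta_nonpos]
  | succ m ih =>
    have hget : ∀ (j : Nat), j ≤ m →
        ((List.range (m + 1)).map (fun (j : Nat) => cesta (j : Int))).getD j 0 = cesta (j : Int) := by
      intro j hj
      rw [List.getD_eq_getElem?_getD, List.getElem?_map,
        List.getElem?_range (by omega : j < m + 1)]
      simp
    have hk : ¬ ((m : Int) + 1 ≤ 0) := by omega
    have h1 : ((m : Int) + 1 - 1).toNat = m := by omega
    have e1 : (m : Int) + 1 - 1 = (m : Int) := by omega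
    have key : dpStep ((List.range (m + 1)).map (fun (j : Nat) => cesta (j : Int))) ((m : Int) + 1)
        = (List.range (m + 1)).map (fun (j : Nat) => cesta (j : Int)) ++ [cesta ((m : Int) + 1)] := by
      by_cases hc : ((m : Int) + 1) ∈ polozaji
      · rw [dpStep, if_pos hc, cesta_pos _ hk, if_pos hc]
        have h3 : (max ((m : Int) + 1 - t - 1) 0).toNat ≤ m := by
          simp only [t]; omega
        have h3' : cesta (((max ((m : Int) + 1 - t - 1) 0).toNat : Int))
            = cesta ((m : Int) + 1 - t - 1) := by
          rcases le_or_gt ((m : Int) + 1 - t - 1) 0 with hle | hgt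
          · rw [cesta_nonpos _ hle, cesta_nonpos]
            simp only [t] at hle ⊢; omega
          · congr 1; omega
        rw [h1, hget m le_rfl, hget _ h3, h3', e1]
      · rw [dpStep, if_neg hc, cesta_pos _ hk, if_neg hc, h1, hget m le_rfl, e1]
    rw [List.range_succ, List.foldl_append, ih, List.foldl_cons, List.foldl_nil, key]
    conv_rhs => rw [List.range_succ]
    rw [List.map_append]
    simp

theorem cesta_alt_eq (i : Int) : cesta_alt i = cesta i := by
  unfold cesta_alt
  split
  · rw [cesta_nonpos _ (by assumption)]
  · rename_i h
    rw [dp_invariant]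
    have hi : ((i.toNat : Int)) = i := by omega
    rw [List.getD_eq_getElem?_getD, List.getElem?_map,
      List.getElem?_range (by omega : i.toNat < i.toNat + 1)]
    simp [hi]

-- ===== VERDICT (by name: the statement is the Claim_ definition above) =====
theorem cesta_spec : Claim_equal_cesta := by
  intro i _ _
  unfold Spec_cesta
  exact (cesta_alt_eq i).symm
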